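-- pv_equiv track=rewrite | github.com/LucianoAAP/trybe-exercises | exercises/bloco-36/arrays/ex.py | get_max_without_instabilities
-- ===== SOURCE A (Python) =====
-- def get_max_without_instabilities(instances):
--     intervals = [0]
--     for instance in instances:
--         if instance == 0:
--             intervals.append(0)
--         else:
--             intervals[-1] += 1
--     return max(intervals)
-- ===== SOURCE B (Python) =====
-- def get_max_without_instabilities(instances):
--     n = len(instances)
--     bounds = [-1] + [i for i, v in enumerate(instances) if v == 0] + [n]
--     return max(b - a - 1 for a, b in zip(bounds, bounds[1:]))
-- ===== Notes on version B (the rewrite author's own statement) =====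
-- stated objective: alternative
-- what changed: B replaces A's run-length-accumulating loop (build a list of run lengths, then max) by index arithmetic: it collects the positions of the zeros with sentinel bounds -1 and len, and returns the maximum gap between consecutive positions.
import Mathlib
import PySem

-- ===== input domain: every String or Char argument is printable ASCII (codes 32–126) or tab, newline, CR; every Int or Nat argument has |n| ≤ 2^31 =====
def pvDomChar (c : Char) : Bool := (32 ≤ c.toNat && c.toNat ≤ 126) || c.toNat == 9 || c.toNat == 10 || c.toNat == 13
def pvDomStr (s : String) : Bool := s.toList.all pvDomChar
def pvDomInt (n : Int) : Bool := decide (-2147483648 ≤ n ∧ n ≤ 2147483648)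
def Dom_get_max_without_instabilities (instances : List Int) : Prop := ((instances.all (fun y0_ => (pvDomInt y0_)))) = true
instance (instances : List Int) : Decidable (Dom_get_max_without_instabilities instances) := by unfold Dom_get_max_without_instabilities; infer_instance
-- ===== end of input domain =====

-- B replaces A's run-length-accumulating loop by index arithmetic: it collects the positions of the
-- zeros (with sentinels -1 and len) and takes the max gap between consecutive positions (objective: alternative).

-- ===== PORT A =====
-- loop body: 'intervals.append(0)' / 'intervals[-1] += 1' (the list starts as [0], so it is never empty
-- and pyGet? … (-1) is always some; '.getD 0' only discharges the option)
def pvStepA (ivs : List Int) (inst : Int) : List Int :=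
  if inst == 0 then ivs ++ [(0 : Int)]
  else ivs.dropLast ++ [(PySem.List.pyGet? ivs (-1)).getD 0 + 1]

def get_max_without_instabilities (instances : List Int) : Int :=
  let intervals := instances.foldl pvStepA [(0 : Int)]
  -- max(intervals): the list is never empty, so max? is always some
  (PySem.List.max? intervals (fun y => y)).getD 0

-- ===== PORT B =====
-- '[i for i, v in enumerate(instances) if v == 0]'
def pvZeros (instances : List Int) : List Int :=
  (PySem.List.enumerate instances).filterMap (fun p => if p.2 == 0 then some p.1 else none)

def get_max_without_instabilities_alt (instances : List Int) : Int :=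
  let n : Int := PySem.List.len instances
  let bounds : List Int := [(-1 : Int)] ++ pvZeros instances ++ [n]
  -- 'max(b - a - 1 for a, b in zip(bounds, bounds[1:]))': bounds has at least two elements,
  -- so the generator is nonempty and max? is always some
  (PySem.List.max? ((bounds.zip (PySem.List.slice bounds (some 1) none)).map
      (fun p => p.2 - p.1 - 1)) (fun y => y)).getD 0

-- ===== PRECONDITION & SPEC =====
def Spec_get_max_without_instabilities (instances : List Int) (out : Int) : Prop := out = get_max_without_instabilities_alt instances
instance (instances : List Int) (out : Int) : Decidable (Spec_get_max_without_instabilities instances out) := by unfold Spec_get_max_without_instabilities; infer_instance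

-- ===== CLAIM (what is proved, stated in full; the proofs are below) =====
def Claim_equal_get_max_without_instabilities : Prop := ∀ (instances : List Int), Dom_get_max_without_instabilities instances → Spec_get_max_without_instabilities instances (get_max_without_instabilities instances)

-- ===== LEMMAS AND PROOFS =====

-- the gap list of consecutive differences (minus one) along a :: l
def pvGaps (a : Int) : List Int → List Int
  | [] => []
  | b :: t => (b - a - 1) :: pvGaps b t

lemma pv_zip_map_eq_gaps (l : List Int) : ∀ (a : Int),
    (((a :: l).zip (a :: l).tail).map (fun p => p.2 - p.1 - 1)) = pvGaps a l := by
  induction l with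
  | nil => intro a; rfl
  | cons b t ih =>
    intro a
    simp only [List.tail_cons] at ih ⊢
    simp [pvGaps, ih b]

lemma pv_gaps_concat (zs : List Int) : ∀ (a m : Int),
    pvGaps a (zs ++ [m]) = pvGaps a zs ++ [m - zs.getLastD a - 1] := by
  induction zs with
  | nil => intro a m; rfl
  | cons b t ih => intro a m; simp only [List.cons_append, pvGaps, ih b, List.getLastD_cons]

lemma pv_zeros_append (xs : List Int) (v : Int) :
    pvZeros (xs ++ [v]) = pvZeros xs ++ (if v == 0 then [(xs.length : Int)] else []) := by
  unfold pvZeros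
  rw [PySem.List.enumerate_append, List.filterMap_append]
  congr 1
  by_cases hv : v = 0 <;>
    simp [PySem.List.enumerate_cons, PySem.List.enumerate_nil, hv]

-- A's intervals list IS the gap list between consecutive zero positions (with sentinels -1 and len)
lemma pv_main (xs : List Int) :
    xs.foldl pvStepA [(0 : Int)] = pvGaps (-1) (pvZeros xs ++ [(xs.length : Int)]) := by
  induction xs using List.reverseRecOn with
  | nil => simp [pvZeros, PySem.List.enumerate_nil, pvGaps]
  | append_singleton xs v ih =>
    rw [List.foldl_append, List.foldl_cons, List.foldl_nil, ih, pv_zeros_append]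
    by_cases hv : v = 0
    · simp only [hv, beq_self_eq_true, if_true, pvStepA]
      rw [pv_gaps_concat, pv_gaps_concat]
      simp
      rw [pv_gaps_concat]
      simp
    · simp only [beq_iff_eq, hv, if_false, List.append_nil, pvStepA]
      rw [pv_gaps_concat, pv_gaps_concat, List.dropLast_concat,
          PySem.List.pyGet?_neg_one_append_singleton, Option.getD_some]
      simp
      ring

-- ===== VERDICT (by name: the statement is the Claim_ definition above) =====
theorem get_max_without_instabilities_spec : Claim_equal_get_max_without_instabilities := by
  intro instances _
  unfold Spec_get_max_without_instabilities get_max_without_instabilities get_max_without_instabilities_alt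
  simp only [PySem.List.slice_from_one, List.cons_append,
    List.nil_append, PySem.List.len_eq]
  rw [pv_zip_map_eq_gaps (pvZeros instances ++ [(instances.length : Int)]) (-1), pv_main]
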